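-- pv_equiv track=rewrite | github.com/Shivangimantri/Noise_detection_BERT | chunking_utils.py | noise1
-- ===== SOURCE A (Python) =====
-- def noise1(message_raw):
--     def isword(part):
--         partlist = part.split()
--         partlist = filter(lambda x: x, partlist)
--         return len(list(partlist)) == 1
--
--     message_dict = {}
--     rows = message_raw.split("\n")
--     key, val = "", ""
--     for r in rows:
--         rsplit = r.split(":")
--         if len(rsplit) > 1 and isword(rsplit[0]):
--             key = rsplit[0].strip().lower()
--             val = ":".join(rsplit[1:])
--             message_dict[key] = val
--         elif val:
--             val += ("\n" + r)
--             message_dict[key] = val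
--     return bool(message_dict)
-- ===== SOURCE B (Python) =====
-- def noise1(message_raw):
--     def isword(part):
--         partlist = part.split()
--         partlist = filter(lambda x: x, partlist)
--         return len(list(partlist)) == 1
--
--     return any(len(r.split(":")) > 1 and isword(r.split(":")[0])
--                for r in message_raw.split("\n"))
-- ===== Notes on version B (the rewrite author's own statement) =====
-- stated objective: simpler
-- what changed: B drops the dict/key/val state entirely: since the elif branch never adds a new key, the dict is non-empty iff some row triggers the key-match test, so B is a single short-circuiting any() over the rows.
import Mathlib
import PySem

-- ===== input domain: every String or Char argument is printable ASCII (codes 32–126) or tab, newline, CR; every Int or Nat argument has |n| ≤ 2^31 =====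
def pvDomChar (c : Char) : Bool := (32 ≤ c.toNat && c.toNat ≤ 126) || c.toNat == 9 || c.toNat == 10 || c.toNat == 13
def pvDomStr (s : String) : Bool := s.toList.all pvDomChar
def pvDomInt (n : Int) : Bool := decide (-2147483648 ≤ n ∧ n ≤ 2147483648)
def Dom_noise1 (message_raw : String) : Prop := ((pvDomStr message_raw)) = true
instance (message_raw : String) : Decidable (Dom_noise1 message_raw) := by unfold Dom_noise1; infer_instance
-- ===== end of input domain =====

-- B replaces A's dict/key/val bookkeeping by a single short-circuiting any() over the rows
-- (simpler decomposition; the elif branch never adds a new key, so dict-nonemptiness equals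
-- "some row matched the key test"). Same O(n) cost.

-- ===== PORT A =====
-- isword helper, shared verbatim by both Pythons
def pvIsword (part : String) : Bool :=
  -- part.split() yields the whitespace-split words; filter(lambda x: x, …) keeps truthy (nonempty) ones
  (((PySem.Str.split₀ part).filter (fun x => x ≠ "")).length == 1)

def pvStepA (st : PySem.Dict String String × String × String) (r : String) :
    PySem.Dict String String × String × String :=
  let rsplit := (PySem.Str.split? r ":").getD []
  if rsplit.length > 1 ∧ pvIsword (rsplit.headD "") = true then
    let key := PySem.Str.lower (PySem.Str.strip (rsplit.headD ""))
    let val := PySem.Str.join ":" (rsplit.drop 1)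
    (st.1.insert key val, key, val)
  else if st.2.2 ≠ "" then
    let val := PySem.Str.join "" [st.2.2, "\n", r]   -- val += ("\n" + r), via PySem.Str.join (exact concatenation)
    (st.1.insert st.2.1 val, st.2.1, val)
  else st

def noise1 (message_raw : String) : Bool :=
  let rows := (PySem.Str.split? message_raw "\n").getD []
  let st := rows.foldl pvStepA (PySem.Dict.empty, "", "")
  (st.1.size != 0)

-- ===== PORT B =====
def pvMatch (r : String) : Bool :=
  (((PySem.Str.split? r ":").getD []).length > 1) && pvIsword (((PySem.Str.split? r ":").getD []).headD "")

def noise1_alt (message_raw : String) : Bool :=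
  ((PySem.Str.split? message_raw "\n").getD []).any pvMatch

-- ===== PRECONDITION & SPEC =====
def Spec_noise1 (message_raw : String) (out : Bool) : Prop := out = noise1_alt message_raw
instance (message_raw : String) (out : Bool) : Decidable (Spec_noise1 message_raw out) := by unfold Spec_noise1; infer_instance

-- ===== CLAIM (what is proved, stated in full; the proofs are below) =====
def Claim_equal_noise1 : Prop := ∀ (message_raw : String), Dom_noise1 message_raw → Spec_noise1 message_raw (noise1 message_raw)

-- ===== LEMMAS AND PROOFS =====

-- a Dict that just received an insert is non-empty
lemma size_insert_ne_zero (d : PySem.Dict String String) (k : String) (v : String) :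
    (d.insert k v).size ≠ 0 := by
  rw [PySem.Dict.size_insert]
  split_ifs with hc
  · have hk := (PySem.Dict.contains_iff_mem_keys d k).mp hc
    cases d with
    | mk l => cases l <;> simp_all [PySem.Dict.keys, PySem.Dict.size]
  · omega

-- A's if-condition on a row is exactly B's predicate pvMatch
lemma cond_eq_pvMatch (r : String) :
    (((PySem.Str.split? r ":").getD []).length > 1 ∧
      pvIsword (((PySem.Str.split? r ":").getD []).headD "") = true) ↔ pvMatch r = true := by
  simp [pvMatch]

-- loop invariant: after processing `rows` from state (d, key, val) with (val ≠ "" → d ≠ ∅),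
-- the dict is non-empty iff it started non-empty or some row matches
lemma loopA (rows : List String) (d : PySem.Dict String String) (key val : String)
    (h : val ≠ "" → d.size ≠ 0) :
    ((rows.foldl pvStepA (d, key, val)).1.size ≠ 0) ↔ (d.size ≠ 0 ∨ rows.any pvMatch = true) := by
  induction rows generalizing d key val with
  | nil => simp
  | cons r rows ih =>
    rw [List.foldl_cons, pvStepA]
    simp only
    split_ifs with h1 h2
    · rw [ih _ _ _ (fun _ => size_insert_ne_zero _ _ _)]
      have hm := (cond_eq_pvMatch r).mp h1
      simp [hm, size_insert_ne_zero]
    · have hd := h h2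
      rw [ih _ _ _ (fun _ => size_insert_ne_zero _ _ _)]
      simp [hd, size_insert_ne_zero]
    · rw [ih _ _ _ h]
      have hm : pvMatch r = false := by
        rcases Bool.eq_false_or_eq_true (pvMatch r) with ht | hf
        · exact absurd ((cond_eq_pvMatch r).mpr ht) h1
        · exact hf
      simp [hm]

-- ===== VERDICT (by name: the statement is the Claim_ definition above) =====
theorem noise1_spec : Claim_equal_noise1 := by
  intro s _
  unfold Spec_noise1 noise1 noise1_alt
  have h := loopA ((PySem.Str.split? s "\n").getD []) PySem.Dict.empty "" ""
    (fun hv => absurd rfl hv)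
  simp only [PySem.Dict.size_empty, ne_eq, not_true_eq_false, false_or] at h
  cases hb : ((PySem.Str.split? s "\n").getD []).any pvMatch with
  | true => simp [h.mpr hb]
  | false =>
    have hz : (List.foldl pvStepA (PySem.Dict.empty, "", "")
        ((PySem.Str.split? s "\n").getD [])).1.size = 0 := by
      by_contra hc
      rw [hb] at h
      exact absurd (h.mp hc) (by simp)
    simp [hz]
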